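-- pv_equiv track=rewrite | github.com/shivika030/HACKWITHINFY_2026 | HackerRank/Luck_Balance.py | luckBalance
-- ===== SOURCE A (Python) =====
-- def luckBalance(k, c):
--     mini=[]
--     sums=0
--     for i in range(len(c)):
--         if c[i][-1]==0:
--             sums+=c[i][0]
--         else:
--             sums+=c[i][0]
--             mini.append(c[i][0])
--     mini.sort()
--     for i in range(len(mini)-k):
--         sums-=mini[i]*2
--     return sums
-- ===== SOURCE B (Python) =====
-- def luckBalance(k, c):
--     total = 0
--     important = []
--     for row in c:
--         total += row[0]
--         if row[-1] != 0:
--             important.append(row[0])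
--     return total - 2 * _sum_smallest(important, len(important) - k)
--
--
-- def _sum_smallest(xs, n):
--     # sum of the n smallest elements of xs, quickselect-style (0 if n <= 0,
--     # sum(xs) if n >= len(xs)); selects without fully sorting.
--     if n <= 0:
--         return 0
--     if n >= len(xs):
--         return sum(xs)
--     p = xs[len(xs) // 2]
--     lt = [x for x in xs if x < p]
--     eq = [x for x in xs if x == p]
--     gt = [x for x in xs if x > p]
--     if n <= len(lt):
--         return _sum_smallest(lt, n)
--     if n <= len(lt) + len(eq):
--         return sum(lt) + p * (n - len(lt))
--     return sum(lt) + sum(eq) + _sum_smallest(gt, n - len(lt) - len(eq))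
-- ===== Notes on version B (the rewrite author's own statement) =====
-- stated objective: alternative
-- what changed: B replaces A's full sort of the important losses by a quickselect-style three-way-partition recursion that sums only the (m-k) smallest of them.
import Mathlib
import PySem

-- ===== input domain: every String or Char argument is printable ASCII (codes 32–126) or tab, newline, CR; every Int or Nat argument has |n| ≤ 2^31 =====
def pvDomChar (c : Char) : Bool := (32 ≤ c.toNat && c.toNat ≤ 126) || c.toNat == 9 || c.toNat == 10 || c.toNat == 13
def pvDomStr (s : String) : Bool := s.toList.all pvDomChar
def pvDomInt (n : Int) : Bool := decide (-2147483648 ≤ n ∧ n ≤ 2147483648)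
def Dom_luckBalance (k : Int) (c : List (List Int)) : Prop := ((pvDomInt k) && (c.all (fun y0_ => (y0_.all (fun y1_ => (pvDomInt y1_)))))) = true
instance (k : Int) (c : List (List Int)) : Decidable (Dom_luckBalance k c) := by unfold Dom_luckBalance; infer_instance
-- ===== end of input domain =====

-- B replaces A's full sort of the important losses by a quickselect-style
-- three-way-partition recursion that sums the (m-k) smallest of them (objective: alternative).

-- ===== PORT A =====
-- A: one indexed pass accumulating (mini, sums), then sort mini, then subtract
-- twice each of the first len(mini)-k sorted values.  Row accesses c[i][-1] /
-- c[i][0] use pyGetD with default 0/[]: Pre_ excludes the inputs where Python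
-- would raise (empty rows, k < 0), so the defaults are never the observed value.
def luckBalance (k : Int) (c : List (List Int)) : Int :=
  let st := (PySem.List.pyRange 0 (c.length : Int) 1).foldl
    (fun (s : List Int × Int) i =>
      if PySem.List.pyGetD (PySem.List.pyGetD c i []) (-1) 0 == 0 then
        (s.1, s.2 + PySem.List.pyGetD (PySem.List.pyGetD c i []) 0 0)
      else
        (s.1 ++ [PySem.List.pyGetD (PySem.List.pyGetD c i []) 0 0],
         s.2 + PySem.List.pyGetD (PySem.List.pyGetD c i []) 0 0))
    ([], 0)
  let mini := PySem.List.sorted st.1 (fun x => x) false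
  (PySem.List.pyRange 0 ((mini.length : Int) - k) 1).foldl
    (fun sums i => sums - PySem.List.pyGetD mini i 0 * 2) st.2

-- ===== PORT B =====
-- termination helper for sumSmallest (cited in its decreasing_by)
theorem pv_filter_attach_lt {xs : List Int} (q : Int → Bool) (h : ∃ x ∈ xs, q x = false) :
    (List.filter (fun x : {y // y ∈ xs} => q ↑x) xs.attach).length < xs.length := by
  have h2 : (xs.filter q).length < xs.length :=
    List.length_filter_lt_length_iff_exists.mpr (by simpa using h)
  rw [← List.countP_eq_length_filter] at h2 ⊢
  rw [List.countP_attach]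
  exact h2

-- quickselect-style sum of the n smallest elements of xs (Source B's _sum_smallest)
def sumSmallest (xs : List Int) (n : Int) : Int :=
  if n ≤ 0 then 0
  else if (xs.length : Int) ≤ n then xs.sum
  else
    let p := xs.getD (xs.length / 2) 0   -- xs[len(xs)//2]; index in range here
    let lt := xs.filter (fun x => decide (x < p))
    let eq := xs.filter (fun x => decide (x = p))
    let gt := xs.filter (fun x => decide (p < x))
    if n ≤ (lt.length : Int) then sumSmallest lt n
    else if n ≤ (lt.length : Int) + (eq.length : Int) then
      lt.sum + p * (n - (lt.length : Int))
    else
      lt.sum + eq.sum + sumSmallest gt (n - (lt.length : Int) - (eq.length : Int))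
termination_by xs.length
decreasing_by
  · have hx : xs ≠ [] := by
      intro h; subst h; simp at *; omega
    have hp : xs.getD (xs.length / 2) 0 ∈ xs := by
      have : xs.length / 2 < xs.length := by
        have := List.length_pos_iff.mpr hx; omega
      rw [List.getD_eq_getElem xs 0 this]
      exact List.getElem_mem this
    simp only [List.length_unattach]
    exact pv_filter_attach_lt (fun y => decide (y < xs.getD (xs.length / 2) 0))
      ⟨_, hp, by simp⟩
  · have hx : xs ≠ [] := by
      intro h; subst h; simp at *; omega
    have hp : xs.getD (xs.length / 2) 0 ∈ xs := by
      have : xs.length / 2 < xs.length := by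
        have := List.length_pos_iff.mpr hx; omega
      rw [List.getD_eq_getElem xs 0 this]
      exact List.getElem_mem this
    simp only [List.length_unattach]
    exact pv_filter_attach_lt (fun y => decide (xs.getD (xs.length / 2) 0 < y))
      ⟨_, hp, by simp⟩

def luckBalance_alt (k : Int) (c : List (List Int)) : Int :=
  let st := c.foldl
    (fun (s : Int × List Int) row =>
      let s1 := s.1 + PySem.List.pyGetD row 0 0
      if PySem.List.pyGetD row (-1) 0 ≠ 0 then (s1, s.2 ++ [PySem.List.pyGetD row 0 0])
      else (s1, s.2))
    (0, [])
  st.1 - 2 * sumSmallest st.2 ((st.2.length : Int) - k)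

-- ===== PRECONDITION & SPEC =====
-- Pre_ excludes exactly the inputs where the Python A raises an IndexError:
-- an empty row (c[i][-1]) or k < 0 (the second loop then reads past the end of mini).
def Pre_luckBalance (k : Int) (c : List (List Int)) : Prop :=
  0 ≤ k ∧ ∀ row ∈ c, row ≠ []
instance (k : Int) (c : List (List Int)) : Decidable (Pre_luckBalance k c) := by
  unfold Pre_luckBalance; infer_instance
def pvWitness_luckBalance : Int × List (List Int) := (2, [[5, 1], [4, 0], [3, 1], [2, 1]])

def Spec_luckBalance (k : Int) (c : List (List Int)) (out : Int) : Prop := out = luckBalance_alt k c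
instance (k : Int) (c : List (List Int)) (out : Int) : Decidable (Spec_luckBalance k c out) := by unfold Spec_luckBalance; infer_instance

-- ===== CLAIM (what is proved, stated in full; the proofs are below) =====
def Claim_equal_luckBalance : Prop := ∀ (k : Int) (c : List (List Int)), Dom_luckBalance k c → Pre_luckBalance k c → Spec_luckBalance k c (luckBalance k c)

-- ===== LEMMAS AND PROOFS =====

-- the three-way filter partition of a list by comparison with a pivot is a permutation of it
theorem pv_perm3 (p : Int) (xs : List Int) :
    (xs.filter (fun x => decide (x < p)) ++ xs.filter (fun x => decide (x = p))
      ++ xs.filter (fun x => decide (p < x))).Perm xs := by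
  induction xs with
  | nil => simp
  | cons a t ih =>
    rcases lt_trichotomy a p with h | h | h
    · simp only [List.filter_cons, decide_eq_true_eq, if_pos h, if_neg h.ne,
        if_neg (not_lt.mpr h.le), List.cons_append]
      exact ih.cons a
    · subst h
      simp only [List.filter_cons, decide_eq_true_eq, if_neg (lt_irrefl a),
        List.append_assoc]
      exact List.perm_middle.trans (by simpa [List.append_assoc] using ih.cons a)
    · simp only [List.filter_cons, decide_eq_true_eq, if_neg (not_lt.mpr h.le),
        if_neg h.ne', if_pos h, List.append_assoc]
      exact ((List.perm_middle.append_left _).trans List.perm_middle).trans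
        (by simpa [List.append_assoc] using ih.cons a)

-- python sorted(xs) splits at a pivot into sorted(lt) ++ eq ++ sorted(gt)
theorem pv_sorted_decomp (p : Int) (xs : List Int) :
    PySem.List.sorted xs (fun x => x) false =
      PySem.List.sorted (xs.filter (fun x => decide (x < p))) (fun x => x) false
      ++ xs.filter (fun x => decide (x = p))
      ++ PySem.List.sorted (xs.filter (fun x => decide (p < x))) (fun x => x) false := by
  apply PySem.List.sorted_id_eq_of_perm_of_pairwise
  · exact (((PySem.List.sorted_perm _ _ _).append (List.Perm.refl _)).append
      (PySem.List.sorted_perm _ _ _)).trans (pv_perm3 p xs)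
  · have hmemL : ∀ x ∈ PySem.List.sorted (xs.filter (fun x => decide (x < p))) (fun x => x) false,
        x < p := by
      intro x hx
      rw [PySem.List.mem_sorted] at hx
      simpa using (List.mem_filter.mp hx).2
    have hmemE : ∀ x ∈ xs.filter (fun x => decide (x = p)), x = p := by
      intro x hx; simpa using (List.mem_filter.mp hx).2
    have hmemG : ∀ x ∈ PySem.List.sorted (xs.filter (fun x => decide (p < x))) (fun x => x) false,
        p < x := by
      intro x hx
      rw [PySem.List.mem_sorted] at hx
      simpa using (List.mem_filter.mp hx).2
    rw [List.pairwise_append, List.pairwise_append]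
    refine ⟨⟨?_, ?_, ?_⟩, ?_, ?_⟩
    · simpa using PySem.List.sorted_pairwise (xs := xs.filter (fun x => decide (x < p)))
        (key := fun x => x)
    · exact List.pairwise_of_forall_mem_list (fun a ha b hb => by
        rw [hmemE a ha, hmemE b hb])
    · intro a ha b hb
      exact le_of_lt (lt_of_lt_of_le (hmemL a ha) (hmemE b hb).ge)
    · simpa using PySem.List.sorted_pairwise (xs := xs.filter (fun x => decide (p < x)))
        (key := fun x => x)
    · intro a ha b hb
      rcases List.mem_append.mp ha with h | h
      · exact le_of_lt (lt_trans (hmemL a h) (hmemG b hb))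
      · exact le_of_lt (lt_of_le_of_lt (hmemE a h).le (hmemG b hb))

-- quickselect sums the n smallest = sum of the first n of the sorted list
theorem pv_sumSmallest_eq_aux : ∀ (L : Nat) (xs : List Int), xs.length ≤ L → ∀ (n : Int),
    sumSmallest xs n = ((PySem.List.sorted xs (fun x => x) false).take n.toNat).sum := by
  intro L
  induction L with
  | zero =>
    intro xs hlen n
    have hxs : xs = [] := List.length_eq_zero_iff.mp (Nat.le_zero.mp hlen)
    subst hxs
    rw [sumSmallest]
    by_cases h : n ≤ 0
    · simp [h, Int.toNat_of_nonpos h]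
    · rw [if_pos (show ((List.length ([] : List Int) : Int) ≤ n) by simpa using by omega)]
      simp [show (PySem.List.sorted ([] : List Int) (fun x => x) false) = [] from rfl]
  | succ L IHL =>
    intro xs hlen n
    rw [sumSmallest]
    by_cases h0 : n ≤ 0
    · simp [h0, Int.toNat_of_nonpos h0]
    by_cases h1 : (xs.length : Int) ≤ n
    · have htake : (PySem.List.sorted xs (fun x => x) false).take n.toNat
          = PySem.List.sorted xs (fun x => x) false := by
        apply List.take_of_length_le
        rw [PySem.List.length_sorted]
        omega
      rw [if_neg h0, if_pos h1, htake]
      exact ((PySem.List.sorted_perm _ _ _).sum_eq).symm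
    · rw [if_neg h0, if_neg h1]
      set p := xs.getD (xs.length / 2) 0 with hp
      set F1 := xs.filter (fun x => decide (x < p)) with hF1
      set F2 := xs.filter (fun x => decide (x = p)) with hF2
      set F3 := xs.filter (fun x => decide (p < x)) with hF3
      have hxs : xs ≠ [] := by intro h; subst h; simp at h1; omega
      have hpmem : p ∈ xs := by
        rw [hp, List.getD_eq_getElem xs 0 (by have := List.length_pos_iff.mpr hxs; omega)]
        exact List.getElem_mem _
      have hF1lt : F1.length < xs.length := by
        apply List.length_filter_lt_length_iff_exists.mpr
        exact ⟨p, hpmem, by simp⟩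
      have hF3lt : F3.length < xs.length := by
        apply List.length_filter_lt_length_iff_exists.mpr
        exact ⟨p, hpmem, by simp⟩
      have hlens : F1.length + F2.length + F3.length = xs.length := by
        have h := (pv_perm3 p xs).length_eq
        simp only [List.length_append] at h
        omega
      have hdecomp := pv_sorted_decomp p xs
      rw [← hF1, ← hF2, ← hF3] at hdecomp
      rw [hdecomp]
      by_cases c1 : n ≤ (F1.length : Int)
      · rw [if_pos c1]
        have hnF1 : n.toNat ≤ F1.length := by omega
        have htake : ((PySem.List.sorted F1 (fun x => x) false ++ F2
            ++ PySem.List.sorted F3 (fun x => x) false).take n.toNat)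
            = (PySem.List.sorted F1 (fun x => x) false).take n.toNat := by
          rw [List.append_assoc, List.take_append]
          have hz : n.toNat - (PySem.List.sorted F1 (fun x => x) false).length = 0 := by
            rw [PySem.List.length_sorted]; omega
          rw [hz]
          simp
        rw [htake]
        exact IHL F1 (by omega) n
      · rw [if_neg c1]
        have hmemE2 : ∀ x ∈ F2, x = p := by
          intro x hx
          rw [hF2] at hx
          simpa using (List.mem_filter.mp hx).2
        have hrep : F2 = List.replicate F2.length p := List.eq_replicate_of_mem hmemE2
        have hlenS1 : (PySem.List.sorted F1 (fun x => x) false).length = F1.length :=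
          PySem.List.length_sorted _ _ _
        by_cases c2 : n ≤ (F1.length : Int) + (F2.length : Int)
        · rw [if_pos c2]
          have h1le : F1.length ≤ n.toNat := by omega
          rw [List.append_assoc, List.take_append,
            List.take_of_length_le (by rw [hlenS1]; exact h1le), List.take_append]
          have hz : n.toNat - (PySem.List.sorted F1 (fun x => x) false).length - F2.length = 0 := by
            rw [hlenS1]; omega
          rw [hz]
          simp only [List.take_zero, List.append_nil, List.sum_append]
          rw [(PySem.List.sorted_perm F1 (fun x => x) false).sum_eq]
          have hm : ((n.toNat - (PySem.List.sorted F1 (fun x => x) false).length : Nat) : Int)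
              = n - (F1.length : Int) := by rw [hlenS1]; omega
          rw [hrep, List.take_replicate]
          have hmin : min (n.toNat - (PySem.List.sorted F1 (fun x => x) false).length)
              (F2.length) = n.toNat - (PySem.List.sorted F1 (fun x => x) false).length := by
            rw [hlenS1]
            omega
          rw [hmin, List.sum_replicate, nsmul_eq_mul, hm]
          ring
        · rw [if_neg c2]
          have h12le : F1.length + F2.length ≤ n.toNat := by omega
          rw [List.take_append, List.take_of_length_le
            (by simp only [List.length_append, hlenS1]; omega)]
          have hz : n.toNat - (PySem.List.sorted F1 (fun x => x) false ++ F2).length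
              = (n - (F1.length : Int) - (F2.length : Int)).toNat := by
            simp only [List.length_append, hlenS1]; omega
          rw [hz]
          simp only [List.sum_append]
          rw [(PySem.List.sorted_perm F1 (fun x => x) false).sum_eq]
          rw [IHL F3 (by omega) (n - (F1.length : Int) - (F2.length : Int))]

theorem pv_sumSmallest_eq (xs : List Int) (n : Int) :
    sumSmallest xs n = ((PySem.List.sorted xs (fun x => x) false).take n.toNat).sum :=
  pv_sumSmallest_eq_aux xs.length xs le_rfl n

-- A's first loop (over rows) computes the swap of B's first loop
theorem pv_fold_AB (rows : List (List Int)) : ∀ (m : List Int) (t : Int),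
    rows.foldl (fun (s : List Int × Int) row =>
        if PySem.List.pyGetD row (-1) 0 == 0 then
          (s.1, s.2 + PySem.List.pyGetD row 0 0)
        else
          (s.1 ++ [PySem.List.pyGetD row 0 0], s.2 + PySem.List.pyGetD row 0 0)) (m, t)
      = ((rows.foldl (fun (s : Int × List Int) row =>
          if PySem.List.pyGetD row (-1) 0 ≠ 0 then
            (s.1 + PySem.List.pyGetD row 0 0, s.2 ++ [PySem.List.pyGetD row 0 0])
          else (s.1 + PySem.List.pyGetD row 0 0, s.2)) (t, m)).2,
        (rows.foldl (fun (s : Int × List Int) row =>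
          if PySem.List.pyGetD row (-1) 0 ≠ 0 then
            (s.1 + PySem.List.pyGetD row 0 0, s.2 ++ [PySem.List.pyGetD row 0 0])
          else (s.1 + PySem.List.pyGetD row 0 0, s.2)) (t, m)).1) := by
  induction rows with
  | nil => intro m t; simp
  | cons r rs ih =>
    intro m t
    simp only [List.foldl_cons]
    by_cases h : PySem.List.pyGetD r (-1) 0 = 0
    · simp only [h, BEq.rfl, if_pos, ne_eq, not_true_eq_false, if_false]
      exact ih m (t + PySem.List.pyGetD r 0 0)
    · rw [if_neg (by simpa using h), if_pos h]
      exact ih (m ++ [PySem.List.pyGetD r 0 0]) (t + PySem.List.pyGetD r 0 0)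

-- A's second loop subtracts twice each of the first nn elements of l
theorem pv_loop2 (l : List Int) : ∀ (nn : Nat), nn ≤ l.length → ∀ (init : Int),
    (PySem.List.pyRange 0 (nn : Int) 1).foldl
        (fun sums i => sums - PySem.List.pyGetD l i 0 * 2) init
      = init - 2 * ((l.take nn).sum) := by
  intro nn
  induction nn with
  | zero => intro _ init; simp [PySem.List.pyRange_one_eq_nil]
  | succ m ihm =>
    intro h init
    rw [show ((m + 1 : Nat) : Int) = (m : Int) + 1 by push_cast; ring,
      PySem.List.pyRange_one_succ_right (by exact_mod_cast Nat.zero_le m),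
      List.foldl_append, ihm (by omega)]
    simp only [List.foldl_cons, List.foldl_nil]
    rw [PySem.List.pyGetD_natCast, List.getD_eq_getElem l 0 (by omega),
      List.sum_take_succ l m (by omega)]
    ring

-- the same with an Int bound N ≤ len l (empty when N < 0)
theorem pv_loop2' (l : List Int) (N : Int) (h : N ≤ (l.length : Int)) (init : Int) :
    (PySem.List.pyRange 0 N 1).foldl
        (fun sums i => sums - PySem.List.pyGetD l i 0 * 2) init
      = init - 2 * ((l.take N.toNat).sum) := by
  by_cases hN : N ≤ 0
  · rw [PySem.List.pyRange_one_eq_nil hN]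
    simp [Int.toNat_of_nonpos hN]
  · rw [show N = ((N.toNat : Nat) : Int) by omega]
    exact pv_loop2 l N.toNat (by omega) init

-- ===== VERDICT (by name: the statement is the Claim_ definition above) =====
theorem luckBalance_spec : Claim_equal_luckBalance := by
  intro k c _hdom hpre
  obtain ⟨hk, -⟩ := hpre
  show luckBalance k c = luckBalance_alt k c
  simp only [luckBalance, luckBalance_alt]
  rw [PySem.List.foldl_pyRange_zero_pyGetD' c []
    (fun (s : List Int × Int) row =>
      if PySem.List.pyGetD row (-1) 0 == 0 then
        (s.1, s.2 + PySem.List.pyGetD row 0 0)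
      else
        (s.1 ++ [PySem.List.pyGetD row 0 0], s.2 + PySem.List.pyGetD row 0 0)) (([], 0))]
  rw [pv_fold_AB c [] 0]
  rw [pv_loop2' _ _ (by rw [PySem.List.length_sorted]; omega)]
  rw [pv_sumSmallest_eq]
  rw [PySem.List.length_sorted]
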